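-- pv_equiv track=rewrite | github.com/wang97x/wang97x.github.io | .opencode/skills/paper-to-blog/scripts/extract_figures.py | prioritize_figures
-- ===== SOURCE A (Python) =====
-- KEY_FIGURE_PATTERNS = [
--     'pipeline',           # Overall framework
--     'framework',          # Framework
--     'architecture',       # Architecture
--     'model',              # Model architecture
--     'method',             # Method overview
--     'approach',           # Approach
--     'overview',           # Overview
--     'contrastive',        # Contrastive decoding
--     'counterfactual',     # Counterfactual
--     'training',           # Training process
--     'teacher',            # Teacher results
--     'student',            # Student results
--     'acc_las',            # Accuracy vs LAS
--     'perf_change',        # Performance change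
--     'ablation',           # Ablation study
--     'student_size',       # Student size ablation
--     'vacuous',            # Vacuous rationale
--     'case_study',         # Case study
-- ]
--
-- def prioritize_figures(pdf_files):
--     """Sort figures by priority based on naming patterns."""
--     def get_priority(filename):
--         name_lower = filename.lower()
--         for i, pattern in enumerate(KEY_FIGURE_PATTERNS):
--             if pattern in name_lower:
--                 return i
--         return len(KEY_FIGURE_PATTERNS)
--
--     return sorted(pdf_files, key=get_priority)
-- ===== SOURCE B (Python) =====
-- KEY_FIGURE_PATTERNS = [
--     'pipeline', 'framework', 'architecture', 'model', 'method', 'approach',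
--     'overview', 'contrastive', 'counterfactual', 'training', 'teacher',
--     'student', 'acc_las', 'perf_change', 'ablation', 'student_size',
--     'vacuous', 'case_study',
-- ]
--
--
-- def prioritize_figures(pdf_files):
--     """Stable bucket sort: one pass distributing files into priority buckets."""
--     n = len(KEY_FIGURE_PATTERNS)
--     buckets = [[] for _ in range(n + 1)]
--     for f in pdf_files:
--         name = f.lower()
--         p = next((i for i, pat in enumerate(KEY_FIGURE_PATTERNS) if pat in name), n)
--         buckets[p].append(f)
--     return [f for b in buckets for f in b]
-- ===== Notes on version B (the rewrite author's own statement) =====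
-- stated objective: alternative
-- what changed: Replaced sorted(key=priority) by a stable single-pass bucket sort: each file is appended to one of len(KEY_FIGURE_PATTERNS)+1 buckets indexed by its first-match priority, and the buckets are concatenated in ascending order.
import Mathlib
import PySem

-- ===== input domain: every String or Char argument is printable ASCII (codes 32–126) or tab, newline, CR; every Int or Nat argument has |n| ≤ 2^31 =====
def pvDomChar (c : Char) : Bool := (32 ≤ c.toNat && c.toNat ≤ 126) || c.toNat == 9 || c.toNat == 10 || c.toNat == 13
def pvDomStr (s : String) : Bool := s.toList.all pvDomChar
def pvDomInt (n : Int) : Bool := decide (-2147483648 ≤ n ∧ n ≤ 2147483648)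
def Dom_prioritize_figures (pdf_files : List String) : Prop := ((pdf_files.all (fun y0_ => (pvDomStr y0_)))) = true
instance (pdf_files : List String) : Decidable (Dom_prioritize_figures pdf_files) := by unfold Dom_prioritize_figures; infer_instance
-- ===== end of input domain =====

-- B replaces sorted(key=priority) by a stable one-pass bucket sort over the bounded priority range (alternative algorithm, same cost class).


def KEY_FIGURE_PATTERNS : List String :=
  ["pipeline", "framework", "architecture", "model", "method", "approach",
   "overview", "contrastive", "counterfactual", "training", "teacher",
   "student", "acc_las", "perf_change", "ablation", "student_size",
   "vacuous", "case_study"]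

-- ===== PORT A =====
-- the 'for i, pattern in enumerate(...)' loop of get_priority: returns i at the first match, else the final counter (= len(KEY_FIGURE_PATTERNS))
def pvGetPriorityGo (nameLower : List Char) (pats : List String) (i : Nat) : Nat :=
  match pats with
  | [] => i
  | p :: rest =>
      if PySem.Chars.isIn p.toList nameLower then i else pvGetPriorityGo nameLower rest (i + 1)

def pvGetPriority (filename : String) : Nat :=
  pvGetPriorityGo (PySem.Chars.lower filename.toList) KEY_FIGURE_PATTERNS 0

def prioritize_figures (pdf_files : List String) : List String :=
  PySem.List.sorted pdf_files (fun f => pvGetPriority f) false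

-- ===== PORT B =====
-- Source B's priority: next((i for i, pat in enumerate(...) if pat in name), n)
def pvPrioAlt (f : String) : Nat :=
  (KEY_FIGURE_PATTERNS.findIdx?
      (fun pat => PySem.Chars.isIn pat.toList (PySem.Chars.lower f.toList))).getD
    KEY_FIGURE_PATTERNS.length

def prioritize_figures_alt (pdf_files : List String) : List String :=
  (pdf_files.foldl (fun buckets f => buckets.modify (pvPrioAlt f) (· ++ [f]))
      (List.replicate (KEY_FIGURE_PATTERNS.length + 1) [])).flatten

-- ===== PRECONDITION & SPEC =====
def Spec_prioritize_figures (pdf_files : List String) (out : List String) : Prop := out = prioritize_figures_alt pdf_files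
instance (pdf_files : List String) (out : List String) : Decidable (Spec_prioritize_figures pdf_files out) := by unfold Spec_prioritize_figures; infer_instance

-- ===== CLAIM (what is proved, stated in full; the proofs are below) =====
def Claim_equal_prioritize_figures : Prop := ∀ (pdf_files : List String), Dom_prioritize_figures pdf_files → Spec_prioritize_figures pdf_files (prioritize_figures pdf_files)

-- ===== LEMMAS AND PROOFS =====

theorem pvGetPriorityGo_eq (name : List Char) (pats : List String) (i : Nat) :
    pvGetPriorityGo name pats i
      = i + ((pats.findIdx? (fun p => PySem.Chars.isIn p.toList name)).getD pats.length) := by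
  induction pats generalizing i with
  | nil => simp [pvGetPriorityGo]
  | cons p rest ih =>
      simp only [pvGetPriorityGo, List.findIdx?_cons]
      by_cases h : PySem.Chars.isIn p.toList name
      · simp [h]
      · simp only [h, ih (i + 1)]
        cases hf : rest.findIdx? (fun p => PySem.Chars.isIn p.toList name) <;>
          simp [List.length_cons] <;> omega

theorem prio_eq (f : String) : pvGetPriority f = pvPrioAlt f := by
  simp [pvGetPriority, pvPrioAlt, pvGetPriorityGo_eq]

theorem prioAlt_lt (f : String) : pvPrioAlt f < KEY_FIGURE_PATTERNS.length + 1 := by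
  unfold pvPrioAlt
  cases hf : KEY_FIGURE_PATTERNS.findIdx?
      (fun pat => PySem.Chars.isIn pat.toList (PySem.Chars.lower f.toList)) with
  | none => simp
  | some i =>
      have := (List.findIdx?_eq_some_iff_findIdx_eq.mp hf).1
      simp; omega

-- x inserted after everything not strictly greater, before everything strictly greater
theorem insertBy_all_true {α : Type} (before : α → α → Bool) (x : α) (ys : List α)
    (h : ∀ y ∈ ys, before x y = true) :
    PySem.List.insertBy before x ys = x :: ys := by
  cases ys with
  | nil => simp [PySem.List.insertBy]
  | cons y t => simp [PySem.List.insertBy, h y (by simp)]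

theorem insertBy_split {α : Type} (before : α → α → Bool) (x : α) (L1 L2 : List α)
    (h1 : ∀ y ∈ L1, before x y = false) (h2 : ∀ y ∈ L2, before x y = true) :
    PySem.List.insertBy before x (L1 ++ L2) = L1 ++ x :: L2 := by
  induction L1 with
  | nil => simpa using insertBy_all_true before x L2 h2
  | cons y t ih =>
      simp only [List.cons_append, PySem.List.insertBy, h1 y (by simp)]
      simp [ih (fun z hz => h1 z (by simp [hz]))]

-- bucket i of xs under key
def pvBucket {α : Type} (key : α → Nat) (xs : List α) (i : Nat) : List α :=
  xs.filter (fun x => key x = i)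

theorem bucket_append_one {α : Type} (key : α → Nat) (xs : List α) (x : α) (i : Nat) :
    pvBucket key (xs ++ [x]) i = pvBucket key xs i ++ (if key x = i then [x] else []) := by
  simp only [pvBucket, List.filter_append]
  by_cases h : key x = i <;> simp [h]

theorem foldl_buckets {α : Type} (key : α → Nat) (n : Nat) (xs : List α) :
    xs.foldl (fun buckets f => buckets.modify (key f) (· ++ [f])) (List.replicate n []) =
      (List.range n).map (pvBucket key xs) := by
  induction xs using List.reverseRecOn with
  | nil =>
      have h : pvBucket key ([] : List α) = fun _ => ([] : List α) := funext fun i => by simp [pvBucket]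
      simp [h, List.map_const']
  | append_singleton xs x ih =>
      rw [List.foldl_append, List.foldl_cons, List.foldl_nil, ih]
      apply List.ext_getElem
      · simp
      · intro j hj hj'
        simp only [List.length_map, List.length_range] at hj'
        rw [List.getElem_modify]
        simp only [List.getElem_map, List.getElem_range, bucket_append_one]
        by_cases h : key x = j <;> simp [h]

theorem sorted_eq_flatten_buckets {α : Type} (key : α → Nat) (n : Nat) (hk : ∀ x, key x < n)
    (xs : List α) :
    PySem.List.sorted xs key false = ((List.range n).map (pvBucket key xs)).flatten := by
  induction xs using List.reverseRecOn with
  | nil => simp [PySem.List.sorted_eq_foldl_insertBy, pvBucket]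
  | append_singleton xs x ih =>
      rw [PySem.List.sorted_eq_foldl_insertBy] at ih ⊢
      rw [List.foldl_append, List.foldl_cons, List.foldl_nil, ih]
      have hx := hk x
      set k := key x with hkx
      -- split range n at k+1
      have hsplit : List.range n = List.range (k + 1) ++ (List.range (n - (k + 1))).map (fun j => (k + 1) + j) := by
        conv_lhs => rw [show n = (k + 1) + (n - (k + 1)) by omega]
        rw [List.range_add]
      rw [hsplit]
      simp only [List.map_append, List.flatten_append, List.map_map]
      rw [insertBy_split]
      · -- values equal
        have hup : ((List.range (n - (k + 1))).map ((pvBucket key (xs ++ [x])) ∘ fun j => (k + 1) + j)) =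
            ((List.range (n - (k + 1))).map ((pvBucket key xs) ∘ fun j => (k + 1) + j)) := by
          apply List.map_congr_left
          intro j hj
          simp only [Function.comp, bucket_append_one]
          have : ¬ (key x = (k + 1) + j) := by omega
          simp [this]
        rw [hup, List.range_succ]
        simp only [List.map_append, List.flatten_append, List.map_cons, List.map_nil,
          List.flatten_cons, List.flatten_nil, List.append_nil]
        have hlow : (List.range k).map (pvBucket key (xs ++ [x])) = (List.range k).map (pvBucket key xs) := by
          apply List.map_congr_left
          intro j hj
          rw [List.mem_range] at hj
          rw [bucket_append_one]
          have : ¬ (key x = j) := by omega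
          simp [this]
        rw [hlow, bucket_append_one, if_pos rfl]
        simp
      · -- L1 elements: key y ≤ k, so ¬ (k < key y)
        intro y hy
        simp only [List.mem_flatten, List.mem_map, List.mem_range] at hy
        obtain ⟨b, ⟨i, hi, rfl⟩, hyb⟩ := hy
        have : key y = i := by
          have := List.of_mem_filter (p := fun z => decide (key z = i)) hyb
          simpa using this
        simp only [decide_eq_false_iff_not]
        omega
      · -- L2 elements: key y ≥ k+1, so k < key y
        intro y hy
        simp only [List.mem_flatten, List.mem_map, List.mem_range] at hy
        obtain ⟨b, ⟨i, hi, rfl⟩, hyb⟩ := hy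
        have : key y = (k + 1) + i := by
          have := List.of_mem_filter (p := fun z => decide (key z = (k + 1) + i)) hyb
          simpa using this
        simp only [decide_eq_true_eq]
        omega

-- ===== VERDICT (by name: the statement is the Claim_ definition above) =====
theorem prioritize_figures_spec : Claim_equal_prioritize_figures := by
  intro pdf_files _
  unfold Spec_prioritize_figures prioritize_figures prioritize_figures_alt
  have hkey : (fun f => pvGetPriority f) = pvPrioAlt := funext prio_eq
  rw [hkey,
    foldl_buckets pvPrioAlt (KEY_FIGURE_PATTERNS.length + 1),
    sorted_eq_flatten_buckets pvPrioAlt (KEY_FIGURE_PATTERNS.length + 1) prioAlt_lt]
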